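-- pv_equiv track=rewrite | github.com/ttzytt/PyAutoGrade | tests/Block 4/tested_code/26/Unit 1/number_guessing_v2.py | product_factor
-- ===== SOURCE A (Python) =====
-- def product_factor(n):
--     result = 1
--     count = 1
--     while count <= n:
--         if n % count == 0:
--             result = result * count
--         count = count + 1
--     return result
-- ===== SOURCE B (Python) =====
-- def product_factor(n):
--     # Stage 1: integer square root by incremental search.
--     r = 0
--     while (r + 1) * (r + 1) <= n:
--         r = r + 1
--     # Stage 2: multiply each small divisor with its cofactor.
--     result = 1
--     for d in range(1, r + 1):
--         if n % d == 0:
--             q = n // d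
--             result = result * (d * (q if q != d else 1))
--     return result
-- ===== Notes on version B (the rewrite author's own statement) =====
-- stated objective: faster
-- what changed: B first computes the integer square root by incremental search, then multiplies each divisor d <= sqrt(n) with its cofactor n//d in a single range pass, instead of A's scan over every candidate up to n.
import Mathlib
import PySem

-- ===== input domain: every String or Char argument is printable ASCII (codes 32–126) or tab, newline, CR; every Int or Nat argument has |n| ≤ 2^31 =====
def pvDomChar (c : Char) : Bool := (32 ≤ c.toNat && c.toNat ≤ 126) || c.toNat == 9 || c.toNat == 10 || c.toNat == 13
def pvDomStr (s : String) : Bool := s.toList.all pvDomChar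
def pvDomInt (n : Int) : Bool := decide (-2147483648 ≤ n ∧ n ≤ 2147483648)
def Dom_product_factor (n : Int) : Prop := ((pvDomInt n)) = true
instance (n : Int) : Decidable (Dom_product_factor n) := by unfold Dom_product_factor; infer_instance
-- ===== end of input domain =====

-- B stages an incremental integer-sqrt search and then one pass over range(1, r+1)
-- multiplying each divisor with its cofactor (objective: faster, O(sqrt n) vs O(n)).

-- ===== PORT A =====
-- while count <= n: if n % count == 0: result *= count; count += 1
def aLoop (n : Int) : Nat → Int → Int → Int
  | 0, _, acc => acc
  | f+1, c, acc =>
    if c ≤ n then aLoop n f (c+1) (if PySem.Int.mod n c = 0 then acc * c else acc) else acc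

def product_factor (n : Int) : Int := aLoop n n.toNat 1 1

-- ===== PORT B =====
-- Stage 1: r = 0; while (r+1)*(r+1) <= n: r += 1
def bSqrt (n : Int) : Nat → Int → Int
  | 0, r => r
  | f+1, r => if (r+1) * (r+1) ≤ n then bSqrt n f (r+1) else r

-- Stage 2: for d in range(1, r+1): if n % d == 0: result *= d * (q if q != d else 1)
def bStage2 (n r : Int) : Int :=
  (PySem.List.pyRange 1 (r+1) 1).foldl
    (fun acc d =>
      if PySem.Int.mod n d = 0 then
        acc * (d * (if PySem.Int.floordiv n d ≠ d then PySem.Int.floordiv n d else 1))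
      else acc) 1

def product_factor_alt (n : Int) : Int := bStage2 n (bSqrt n n.toNat 0)

-- ===== PRECONDITION & SPEC =====
def Spec_product_factor (n : Int) (out : Int) : Prop := out = product_factor_alt n
instance (n : Int) (out : Int) : Decidable (Spec_product_factor n out) := by unfold Spec_product_factor; infer_instance

-- ===== CLAIM (what is proved, stated in full; the proofs are below) =====
def Claim_equal_product_factor : Prop := ∀ (n : Int), Dom_product_factor n → Spec_product_factor n (product_factor n)

-- ===== LEMMAS AND PROOFS =====

-- A's loop is the product of (if k ∣ n then k else 1) over k ∈ [c, n].
lemma aLoop_eq (n : Int) : ∀ (f : Nat) (c acc : Int), (n + 1 - c).toNat ≤ f →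
    aLoop n f c acc = acc * ∏ k ∈ Finset.Icc c n, (if PySem.Int.mod n k = 0 then k else 1) := by
  intro f
  induction f with
  | zero =>
    intro c acc hf
    rw [Finset.Icc_eq_empty (by omega)]
    simp [aLoop]
  | succ f ih =>
    intro c acc hf
    by_cases hc : c ≤ n
    · rw [aLoop, if_pos hc, ih (c+1) _ (by omega),
        ← Finset.insert_Icc_add_one_left_eq_Icc hc,
        Finset.prod_insert (by simp)]
      split_ifs <;> ring
    · rw [aLoop, if_neg hc, Finset.Icc_eq_empty hc]
      simp

-- B's stage 1 computes the integer square root of n (for 1 ≤ n).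
lemma bSqrt_spec (n : Int) (hn : 1 ≤ n) : ∀ (f : Nat) (r : Int), 0 ≤ r → r * r ≤ n →
    (n - r).toNat ≤ f →
    0 ≤ bSqrt n f r ∧ bSqrt n f r * bSqrt n f r ≤ n ∧
      n < (bSqrt n f r + 1) * (bSqrt n f r + 1) := by
  intro f
  induction f with
  | zero =>
    intro r hr0 hrr hf
    have hnr : n ≤ r := by omega
    refine ⟨hr0, hrr, ?_⟩
    simp only [bSqrt]
    nlinarith
  | succ f ih =>
    intro r hr0 hrr hf
    by_cases h : (r+1) * (r+1) ≤ n
    · have hr1 : r + 1 ≤ n := le_trans (by nlinarith) h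
      rw [bSqrt, if_pos h]
      exact ih (r+1) (by omega) h (by omega)
    · rw [bSqrt, if_neg h]
      exact ⟨hr0, hrr, by omega⟩

-- For n ≤ 0 stage 1 returns 0 (the loop guard fails at once).
lemma bSqrt_nonpos (n : Int) (hn : n ≤ 0) (f : Nat) : bSqrt n f 0 = 0 := by
  cases f with
  | zero => rfl
  | succ f => rw [bSqrt, if_neg (by omega)]

-- The foldl of B's stage 2 is the product of its per-element terms.
lemma foldl_mul_prod (n : Int) : ∀ (l : List Int) (acc : Int),
    l.foldl (fun acc d =>
      if PySem.Int.mod n d = 0 then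
        acc * (d * (if PySem.Int.floordiv n d ≠ d then PySem.Int.floordiv n d else 1))
      else acc) acc
    = acc * (l.map (fun d =>
        if PySem.Int.mod n d = 0 then
          d * (if PySem.Int.floordiv n d ≠ d then PySem.Int.floordiv n d else 1)
        else 1)).prod := by
  intro l
  induction l with
  | nil => intro acc; simp
  | cons x xs ih =>
    intro acc
    simp only [List.foldl_cons, List.map_cons, List.prod_cons, ih]
    split_ifs <;> ring

-- The list product over range(1, r+1) is the Finset product over Icc 1 r.
lemma prod_map_pyRange (g : Int → Int) : ∀ (r : Int), 0 ≤ r →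
    ((PySem.List.pyRange 1 (r+1) 1).map g).prod = ∏ k ∈ Finset.Icc 1 r, g k := by
  intro r hr
  induction r, hr using Int.le_induction with
  | base =>
    rw [PySem.List.pyRange_one_eq_nil (by omega), Finset.Icc_eq_empty (by omega)]
    simp
  | succ r hr ih =>
    have hins : Finset.Icc (1:Int) (r+1) = insert (r+1) (Finset.Icc 1 r) := by
      ext k
      simp only [Finset.mem_Icc, Finset.mem_insert]
      omega
    rw [PySem.List.pyRange_one_succ_right (by omega : (1:Int) ≤ r + 1),
      List.map_append, List.prod_append, ih, hins, Finset.prod_insert (by simp)]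
    simp [mul_comm]

-- The pairing bijection: large divisors (d*d > n) correspond to cofactors n/d of
-- small divisors d with n/d ≠ d.
lemma prod_large_divisors (n : Int) (hn : 1 ≤ n) :
    ∏ k ∈ ((Finset.Icc 1 n).filter (fun k => k ∣ n)).filter (fun k => ¬ k * k ≤ n), k
    = ∏ k ∈ (((Finset.Icc 1 n).filter (fun k => k ∣ n)).filter (fun k => k * k ≤ n)).filter
        (fun k => n / k ≠ k), (n / k) := by
  refine Finset.prod_nbij' (fun e => n / e) (fun k => n / k) ?_ ?_ ?_ ?_ ?_
  · intro e he
    simp only [Finset.mem_filter, Finset.mem_Icc] at he ⊢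
    obtain ⟨⟨⟨he1, hen⟩, hdvd⟩, hbig⟩ := he
    push Not at hbig
    obtain ⟨d, hd⟩ := hdvd
    have hq : n / e = d := by rw [hd, Int.mul_ediv_cancel_left _ (by omega)]
    have hd0 : 0 < d := by nlinarith
    have hde : d < e := by
      by_contra h
      push Not at h
      have : e * e ≤ e * d := mul_le_mul_of_nonneg_left h (by omega)
      omega
    have hq2 : n / d = e := by rw [hd, mul_comm, Int.mul_ediv_cancel_left _ (by omega)]
    have hdd : d * d < e * d := mul_lt_mul_of_pos_right hde hd0
    rw [hq]
    refine ⟨⟨⟨⟨by omega, by nlinarith⟩, ⟨e, by rw [hd]; ring⟩⟩, by nlinarith⟩, by rw [hq2]; omega⟩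
  · intro k hk
    simp only [Finset.mem_filter, Finset.mem_Icc] at hk ⊢
    obtain ⟨⟨⟨⟨hk1, hkn⟩, hdvd⟩, hsm⟩, hne⟩ := hk
    obtain ⟨d, hd⟩ := hdvd
    have hq : n / k = d := by rw [hd, Int.mul_ediv_cancel_left _ (by omega)]
    have hd0 : 0 < d := by nlinarith
    have hkd : k < d := by
      rcases lt_trichotomy k d with h | h | h
      · exact h
      · exact absurd (by rw [hq, h]) hne
      · have : k * d < k * k := mul_lt_mul_of_pos_left h (by omega)
        omega
    have hdd : k * d < d * d := mul_lt_mul_of_pos_right hkd hd0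
    rw [hq]
    refine ⟨⟨⟨by omega, by nlinarith⟩, ⟨k, by rw [hd]; ring⟩⟩, by push Not; omega⟩
  · intro e he
    simp only [Finset.mem_filter, Finset.mem_Icc] at he
    obtain ⟨⟨⟨he1, hen⟩, hdvd⟩, _⟩ := he
    obtain ⟨d, hd⟩ := hdvd
    have hq : n / e = d := by rw [hd, Int.mul_ediv_cancel_left _ (by omega)]
    have hd0 : 0 < d := by nlinarith
    show n / (n / e) = e
    rw [hq, hd, mul_comm, Int.mul_ediv_cancel_left _ (by omega)]
  · intro k hk
    simp only [Finset.mem_filter, Finset.mem_Icc] at hk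
    obtain ⟨⟨⟨⟨hk1, hkn⟩, hdvd⟩, _⟩, _⟩ := hk
    obtain ⟨d, hd⟩ := hdvd
    have hq : n / k = d := by rw [hd, Int.mul_ediv_cancel_left _ (by omega)]
    have hd0 : 0 < d := by nlinarith
    show n / (n / k) = k
    rw [hq, hd, mul_comm, Int.mul_ediv_cancel_left _ (by omega)]
  · intro e he
    simp only [Finset.mem_filter, Finset.mem_Icc] at he
    obtain ⟨⟨⟨he1, hen⟩, hdvd⟩, _⟩ := he
    obtain ⟨d, hd⟩ := hdvd
    have hq : n / e = d := by rw [hd, Int.mul_ediv_cancel_left _ (by omega)]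
    have hd0 : 0 < d := by nlinarith
    show e = n / (n / e)
    rw [hq, hd, mul_comm, Int.mul_ediv_cancel_left _ (by omega)]

-- Main identity: A's full product equals the sqrt-bounded paired product.
lemma paired_product (n : Int) (hn : 1 ≤ n) :
    (∏ k ∈ Finset.Icc 1 n, (if PySem.Int.mod n k = 0 then k else 1))
    = ∏ k ∈ (Finset.Icc 1 n).filter (fun k => k * k ≤ n),
        (if PySem.Int.mod n k = 0 then
           k * (if PySem.Int.floordiv n k ≠ k then PySem.Int.floordiv n k else 1) else 1) := by
  have hL : (∏ k ∈ Finset.Icc 1 n, (if PySem.Int.mod n k = 0 then k else 1))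
      = ∏ k ∈ (Finset.Icc 1 n).filter (fun k => k ∣ n), k := by
    rw [Finset.prod_filter]
    refine Finset.prod_congr rfl ?_
    intro k _
    simp [PySem.Int.mod_eq_zero_iff_dvd]
  have hR : (∏ k ∈ (Finset.Icc 1 n).filter (fun k => k * k ≤ n),
        (if PySem.Int.mod n k = 0 then
           k * (if PySem.Int.floordiv n k ≠ k then PySem.Int.floordiv n k else 1) else 1))
      = ∏ k ∈ ((Finset.Icc 1 n).filter (fun k => k ∣ n)).filter (fun k => k * k ≤ n),
          (if n / k ≠ k then k * (n / k) else k) := by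
    conv_rhs => rw [Finset.filter_comm, Finset.prod_filter]
    refine Finset.prod_congr rfl ?_
    intro k hk
    simp only [Finset.mem_filter, Finset.mem_Icc] at hk
    rw [PySem.Int.floordiv_eq_ediv_of_pos (by omega)]
    simp only [PySem.Int.mod_eq_zero_iff_dvd]
    split_ifs <;> ring
  rw [hL, hR]
  rw [← Finset.prod_filter_mul_prod_filter_not ((Finset.Icc 1 n).filter (fun k => k ∣ n))
      (fun k => k * k ≤ n) (fun k => k)]
  rw [Finset.prod_ite]
  simp only [Finset.prod_mul_distrib]
  rw [prod_large_divisors n hn]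
  rw [← Finset.prod_filter_mul_prod_filter_not
      (((Finset.Icc 1 n).filter (fun k => k ∣ n)).filter (fun k => k * k ≤ n))
      (fun k => n / k ≠ k) (fun k => k)]
  ring

-- For r = isqrt n, [1..r] is exactly the small-divisor-candidate range.
lemma Icc_isqrt (n r : Int) (hn : 1 ≤ n) (h0 : 0 ≤ r) (h1 : r * r ≤ n)
    (h2 : n < (r+1) * (r+1)) :
    Finset.Icc 1 r = (Finset.Icc 1 n).filter (fun k => k * k ≤ n) := by
  ext k
  simp only [Finset.mem_filter, Finset.mem_Icc]
  constructor
  · rintro ⟨hk1, hkr⟩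
    have hr1 : 1 ≤ r := by omega
    refine ⟨⟨hk1, ?_⟩, ?_⟩ <;> nlinarith
  · rintro ⟨⟨hk1, _⟩, hkk⟩
    exact ⟨hk1, by nlinarith⟩

-- ===== VERDICT (by name: the statement is the Claim_ definition above) =====
theorem product_factor_spec : Claim_equal_product_factor := by
  intro n _
  unfold Spec_product_factor product_factor product_factor_alt bStage2
  rcases le_or_gt n 0 with hn | hn
  · rw [bSqrt_nonpos n hn, aLoop_eq n n.toNat 1 1 (by omega),
      PySem.List.pyRange_one_eq_nil (by omega), Finset.Icc_eq_empty (by omega)]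
    simp
  · obtain ⟨h0, h1, h2⟩ := bSqrt_spec n hn n.toNat 0 le_rfl (by omega) (by omega)
    rw [aLoop_eq n n.toNat 1 1 (by omega), foldl_mul_prod,
      prod_map_pyRange _ _ h0, Icc_isqrt n _ hn h0 h1 h2, paired_product n hn]
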